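-- pv_equiv track=rewrite | github.com/saisreesresta10/rlaas | optimized_solution.py | optimizeReservedConcurrencyGreedy
-- ===== SOURCE A (Python) =====
-- def optimizeReservedConcurrencyGreedy(conc, price):
--     """Greedy approach - much faster but may not be globally optimal"""
--     n = len(conc)
--     pairs = list(zip(conc, price))
--     pairs.sort()  # Sort by concurrency
--
--     total_cost = 0
--     used = set()
--
--     for curr_conc, curr_price in pairs:
--         target = curr_conc
--         while target in used:
--             target += 1
--
--         used.add(target)
--         total_cost += (target - curr_conc) * curr_price
--
--     return total_cost
-- ===== SOURCE B (Python) =====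
-- def optimizeReservedConcurrencyGreedy(conc, price):
--     """One-pass greedy: after sorting, the smallest free slot is c if c > prev else prev+1."""
--     total = 0
--     prev = None
--     for c, p in sorted(zip(conc, price)):
--         t = c if (prev is None or c > prev) else prev + 1
--         total += (t - c) * p
--         prev = t
--     return total
-- ===== Notes on version B (the rewrite author's own statement) =====
-- stated objective: faster
-- what changed: Replaced the per-element linear probe through a 'used' set by a single sorted sweep that keeps only the last assigned slot (slot = c if c > prev else prev+1), eliminating the set entirely.
import Mathlib
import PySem

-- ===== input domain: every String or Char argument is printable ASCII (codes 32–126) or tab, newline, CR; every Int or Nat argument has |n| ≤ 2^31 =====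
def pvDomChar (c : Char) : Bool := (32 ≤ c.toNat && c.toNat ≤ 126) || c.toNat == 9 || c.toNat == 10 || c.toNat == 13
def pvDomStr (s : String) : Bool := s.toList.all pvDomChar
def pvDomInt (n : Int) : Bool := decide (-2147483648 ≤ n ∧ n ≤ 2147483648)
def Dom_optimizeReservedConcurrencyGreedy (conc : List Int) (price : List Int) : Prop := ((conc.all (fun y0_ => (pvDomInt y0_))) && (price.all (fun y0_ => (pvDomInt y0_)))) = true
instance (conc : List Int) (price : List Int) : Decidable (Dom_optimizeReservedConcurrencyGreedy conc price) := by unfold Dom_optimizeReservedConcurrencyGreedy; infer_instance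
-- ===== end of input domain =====

-- B replaces A's per-element linear probe through a 'used' set by a single sorted sweep
-- that keeps only the previously assigned slot (faster on duplicate-heavy inputs).


-- ===== PORT A =====
-- the 'while target in used: target += 1' loop; each iteration erases the hit element
-- (never probed again, since probes strictly increase and 'used' is duplicate-free),
-- which gives the structural termination measure; behaviour is exactly Python's loop
def pvFindFree (used : List Int) (t : Int) : Int :=
  if h : t ∈ used then pvFindFree (used.erase t) (t + 1) else t
termination_by used.length
decreasing_by
  have h1 := List.length_erase_of_mem h
  have h2 := List.length_pos_of_mem h
  omega

-- one iteration of A's for-loop body (total_cost, used)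
def pvStepA (st : Int × PySem.Set Int) (cp : Int × Int) : Int × PySem.Set Int :=
  let target := pvFindFree st.2 cp.1
  (st.1 + (target - cp.1) * cp.2, PySem.Set.add st.2 target)

def optimizeReservedConcurrencyGreedy (conc : List Int) (price : List Int) : Int :=
  let pairs := PySem.List.sorted2 (List.zip conc price) Prod.fst Prod.snd false
  (pairs.foldl pvStepA ((0 : Int), (PySem.Set.empty : PySem.Set Int))).1

-- ===== PORT B =====
-- one iteration of B's for-loop body (total, prev)
def pvStepB (st : Int × Option Int) (cp : Int × Int) : Int × Option Int :=
  let t := match st.2 with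
    | none => cp.1
    | some prev => if cp.1 > prev then cp.1 else prev + 1
  (st.1 + (t - cp.1) * cp.2, some t)

def optimizeReservedConcurrencyGreedy_alt (conc : List Int) (price : List Int) : Int :=
  let pairs := PySem.List.sorted2 (List.zip conc price) Prod.fst Prod.snd false
  (pairs.foldl pvStepB ((0 : Int), (none : Option Int))).1

-- ===== PRECONDITION & SPEC =====
def Spec_optimizeReservedConcurrencyGreedy (conc : List Int) (price : List Int) (out : Int) : Prop := out = optimizeReservedConcurrencyGreedy_alt conc price
instance (conc : List Int) (price : List Int) (out : Int) : Decidable (Spec_optimizeReservedConcurrencyGreedy conc price out) := by unfold Spec_optimizeReservedConcurrencyGreedy; infer_instance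

-- ===== CLAIM (what is proved, stated in full; the proofs are below) =====
def Claim_equal_optimizeReservedConcurrencyGreedy : Prop := ∀ (conc : List Int) (price : List Int), Dom_optimizeReservedConcurrencyGreedy conc price → Spec_optimizeReservedConcurrencyGreedy conc price (optimizeReservedConcurrencyGreedy conc price)

-- ===== LEMMAS AND PROOFS =====

-- pvFindFree returns its argument when it misses
theorem pvFindFree_not_mem {used : List Int} {t : Int} (h : t ∉ used) :
    pvFindFree used t = t := by
  unfold pvFindFree
  simp [h]

-- the probe: if [c, p] is entirely used and p+1 is free, the loop stops exactly at p+1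
theorem pvFindFree_covered (used : List Int) (c p : Int)
    (hle : c ≤ p + 1)
    (hcov : ∀ x : Int, c ≤ x → x ≤ p → x ∈ used)
    (hfree : (p + 1) ∉ used) :
    pvFindFree used c = p + 1 := by
  by_cases hcp : c = p + 1
  · subst hcp; exact pvFindFree_not_mem hfree
  · have hcple : c ≤ p := by omega
    have hc : c ∈ used := hcov c le_rfl hcple
    rw [pvFindFree, dif_pos hc]
    have : pvFindFree (used.erase c) (c + 1) = p + 1 := by
      apply pvFindFree_covered (used.erase c) (c + 1) p (by omega)
      · intro x hx1 hx2
        have hxne : x ≠ c := by omega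
        exact (List.mem_erase_of_ne hxne).mpr (hcov x (by omega) hx2)
      · intro hmem
        exact hfree (List.mem_of_mem_erase hmem)
    omega
termination_by (p + 1 - c).toNat
decreasing_by omega

-- main fold agreement, with invariant:
--   used ⊆ (-∞, p],  every x with lb ≤ x ≤ p is used,  upcoming concs ≥ lb
theorem pvFoldAgree (l : List (Int × Int)) (lb p : Int) (used : List Int) (tot : Int)
    (hsorted : l.Pairwise (fun a b => a.1 ≤ b.1))
    (hlbl : ∀ a ∈ l, lb ≤ a.1)
    (hub : ∀ x ∈ used, x ≤ p)
    (hcov : ∀ x : Int, lb ≤ x → x ≤ p → x ∈ used) :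
    (l.foldl pvStepA (tot, used)).1 = (l.foldl pvStepB (tot, some p)).1 := by
  induction l generalizing lb p used tot with
  | nil => rfl
  | cons cp t ih =>
    obtain ⟨c, pr⟩ := cp
    have hsorted' := (List.pairwise_cons.mp hsorted).2
    have hheads := (List.pairwise_cons.mp hsorted).1
    have hlbc : lb ≤ c := hlbl (c, pr) (List.mem_cons_self)
    by_cases hgt : c > p
    · -- free slot is c itself
      have hnot : c ∉ used := fun hmem => absurd (hub c hmem) (by omega)
      have hff : pvFindFree used c = c := pvFindFree_not_mem hnot
      simp only [List.foldl_cons, pvStepA, pvStepB, hff, if_pos hgt]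
      have hadd : PySem.Set.add used c = used ++ [c] := PySem.Set.add_of_not_mem hnot
      rw [hadd]
      exact ih c c (used ++ [c]) _ hsorted' (fun a ha => hheads a ha)
        (by intro x hx; rcases List.mem_append.mp hx with h | h
            · exact le_of_lt (lt_of_le_of_lt (hub x h) hgt)
            · simp at h; omega)
        (by intro x hx1 hx2; have : x = c := by omega
            simp [this])
    · -- free slot is p + 1
      have hle : c ≤ p := by omega
      have hfree : (p + 1) ∉ used := fun hmem => absurd (hub _ hmem) (by omega)
      have hff : pvFindFree used c = p + 1 :=
        pvFindFree_covered used c p (by omega) (fun x hx1 hx2 => hcov x (by omega) hx2) hfree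
      simp only [List.foldl_cons, pvStepA, pvStepB, hff, if_neg hgt]
      have hadd : PySem.Set.add used (p + 1) = used ++ [p + 1] := PySem.Set.add_of_not_mem hfree
      rw [hadd]
      exact ih c (p + 1) (used ++ [p + 1]) _ hsorted' (fun a ha => hheads a ha)
        (by intro x hx; rcases List.mem_append.mp hx with h | h
            · exact le_trans (hub x h) (by omega)
            · simp at h; omega)
        (by intro x hx1 hx2
            by_cases hxp : x ≤ p
            · exact List.mem_append.mpr (Or.inl (hcov x (by omega) hxp))
            · have : x = p + 1 := by omega
              simp [this])

-- the sorted2 output is nondecreasing in the first component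
theorem pvInsertBy_pairwise {α : Type} (before : α → α → Bool)
    (hasym : ∀ a b, before a b = true → before b a = false)
    (htrans : ∀ a b c, before b a = false → before c b = false → before c a = false)
    (x : α) (l : List α)
    (hl : l.Pairwise (fun a b => before b a = false)) :
    (PySem.List.insertBy before x l).Pairwise (fun a b => before b a = false) := by
  induction l with
  | nil => simp [PySem.List.insertBy]
  | cons y t ih =>
    have hy := (List.pairwise_cons.mp hl).1
    have ht := (List.pairwise_cons.mp hl).2
    rw [PySem.List.insertBy]
    by_cases hxy : before x y = true
    · rw [if_pos hxy]
      refine List.pairwise_cons.mpr ⟨?_, hl⟩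
      intro z hz
      rcases List.mem_cons.mp hz with rfl | hzt
      · exact hasym x z hxy
      · exact htrans x y z (hasym x y hxy) (hy z hzt)
    · rw [if_neg hxy]
      refine List.pairwise_cons.mpr ⟨?_, ih ht⟩
      intro z hz
      rcases (PySem.List.mem_insertBy before x z t).mp hz with rfl | hzt
      · exact eq_false_of_ne_true hxy
      · exact hy z hzt

theorem pvSorted2_pairwise (xs : List (Int × Int)) :
    (PySem.List.sorted2 xs Prod.fst Prod.snd false).Pairwise (fun a b => a.1 ≤ b.1) := by
  have key : ∀ l : List (Int × Int),
      (l.foldl (fun acc x => PySem.List.insertBy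
        (fun a b => decide (a.1 < b.1) || (!decide (b.1 < a.1) && decide (a.2 < b.2))) x acc) []).Pairwise
        (fun a b => (fun a b : Int × Int => decide (a.1 < b.1) || (!decide (b.1 < a.1) && decide (a.2 < b.2))) b a = false) := by
    intro l
    rw [← List.foldr_reverse]
    induction l.reverse with
    | nil => simp
    | cons x t ih =>
      simp only [List.foldr_cons]
      apply pvInsertBy_pairwise
      · intro a b h
        simp only [Bool.or_eq_true, Bool.and_eq_true, Bool.not_eq_eq_eq_not, Bool.not_true,
          decide_eq_true_eq, decide_eq_false_iff_not] at h
        simp only [Bool.or_eq_false_iff, Bool.and_eq_false_iff, Bool.not_eq_eq_eq_not,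
          Bool.not_false, decide_eq_false_iff_not, decide_eq_true_eq]
        omega
      · intro a b c hba hcb
        simp only [Bool.or_eq_false_iff, Bool.and_eq_false_iff, Bool.not_eq_eq_eq_not,
          Bool.not_false, decide_eq_false_iff_not, decide_eq_true_eq] at hba hcb ⊢
        omega
      · exact ih
  have h := key xs
  have hunfold : PySem.List.sorted2 xs Prod.fst Prod.snd false
      = xs.foldl (fun acc x => PySem.List.insertBy
        (fun a b => decide (a.1 < b.1) || (!decide (b.1 < a.1) && decide (a.2 < b.2))) x acc) [] := by
    rfl
  rw [hunfold]
  refine List.Pairwise.imp ?_ h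
  intro a b hab
  simp only [Bool.or_eq_false_iff, decide_eq_false_iff_not] at hab
  omega

-- ===== VERDICT (by name: the statement is the Claim_ definition above) =====
theorem optimizeReservedConcurrencyGreedy_spec : Claim_equal_optimizeReservedConcurrencyGreedy := by
  intro conc price _
  unfold Spec_optimizeReservedConcurrencyGreedy
  unfold optimizeReservedConcurrencyGreedy optimizeReservedConcurrencyGreedy_alt
  have hpw := pvSorted2_pairwise (List.zip conc price)
  cases hl : PySem.List.sorted2 (List.zip conc price) Prod.fst Prod.snd false with
  | nil => rfl
  | cons cp t =>
    rw [hl] at hpw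
    obtain ⟨c, pr⟩ := cp
    have hsorted' := (List.pairwise_cons.mp hpw).2
    have hheads := (List.pairwise_cons.mp hpw).1
    have hff : pvFindFree (PySem.Set.empty : PySem.Set Int) c = c :=
      pvFindFree_not_mem (by simp [PySem.Set.empty])
    simp only [List.foldl_cons, pvStepA, pvStepB, hff]
    have hadd : PySem.Set.add (PySem.Set.empty : PySem.Set Int) c = [c] := by
      simp [PySem.Set.add, PySem.Set.empty, PySem.Set.contains]
    rw [hadd]
    exact pvFoldAgree t c c [c] (0 + (c - c) * pr) hsorted' (fun a ha => hheads a ha)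
      (by intro x hx; simp at hx; omega)
      (by intro x hx1 hx2; simp [show x = c by omega])
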